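-- pv_equiv track=rewrite | github.com/Jrkrish/SDLC-Agents | src/dev_pilot/nodes/enhanced_coding_node.py | _parse_review_comments_to_issues
-- ===== SOURCE A (Python) =====
-- def _parse_review_comments_to_issues(review_comments: str) -> list:
--     """Parse review comments into actionable GitHub issues"""
--     issues = []
--
--     # Simple parsing - in production, this would be more sophisticated
--     lines = review_comments.split('\n')
--     current_issue = None
--
--     for line in lines:
--         line = line.strip()
--         if not line:
--             continue
--
--         # Look for action items or recommendations
--         if any(keyword in line.lower() for keyword in ['recommend', 'suggest', 'improve', 'consider', 'should']):
--             if current_issue: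
--                 issues.append(current_issue)
--
--             current_issue = {
--                 "title": line[:50] + "..." if len(line) > 50 else line,
--                 "description": f"Code review recommendation:\\n\\n{line}\\n\\nGenerated from automated code review."
--             }
--         elif current_issue and line:
--             current_issue["description"] += f"\\n{line}"
--
--     if current_issue:
--         issues.append(current_issue)
--
--     return issues[:5]  # Limit to 5 issues to avoid spam
-- ===== SOURCE B (Python) =====
-- _KEYWORDS = ['recommend', 'suggest', 'improve', 'consider', 'should']
--
--
-- def _is_header(line):
--     low = line.lower()
--     return any(k in low for k in _KEYWORDS)
--
--
-- def _format_issue(group):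
--     head = group[0]
--     title = head[:50] + "..." if len(head) > 50 else head
--     description = ("Code review recommendation:\\n\\n" + head +
--                    "\\n\\nGenerated from automated code review." +
--                    "".join("\\n" + ln for ln in group[1:]))
--     return {"title": title, "description": description}
--
--
-- def _parse_review_comments_to_issues(review_comments: str) -> list:
--     # phase 1: clean lines; phase 2: drop pre-header prefix; phase 3: group by
--     # header lines; phase 4: format the first five groups.
--     lines = [s for s in (ln.strip() for ln in review_comments.split('\n')) if s]
--     while lines and not _is_header(lines[0]):
--         lines.pop(0)
--     groups = []
--     for ln in lines:
--         if _is_header(ln):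
--             groups.append([ln])
--         else:
--             groups[-1].append(ln)
--     return [_format_issue(g) for g in groups[:5]]
-- ===== Notes on version B (the rewrite author's own statement) =====
-- stated objective: alternative
-- what changed: A's single pass with a mutable running current-issue dict is replaced by a pipeline: clean/strip the lines, drop the pre-header prefix, group lines under their header lines, then format the first five groups into issue dicts.
import Mathlib
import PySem

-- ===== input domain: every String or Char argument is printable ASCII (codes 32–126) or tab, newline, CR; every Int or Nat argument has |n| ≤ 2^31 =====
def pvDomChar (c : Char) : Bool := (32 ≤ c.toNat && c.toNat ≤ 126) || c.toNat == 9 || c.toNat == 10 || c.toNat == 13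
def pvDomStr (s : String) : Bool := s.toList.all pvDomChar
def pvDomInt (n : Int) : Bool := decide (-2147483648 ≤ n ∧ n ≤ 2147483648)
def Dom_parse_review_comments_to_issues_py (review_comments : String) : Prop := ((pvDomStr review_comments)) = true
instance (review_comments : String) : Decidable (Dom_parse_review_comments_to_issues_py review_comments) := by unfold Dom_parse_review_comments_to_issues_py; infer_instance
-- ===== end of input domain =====

-- B replaces A's single running-state loop (mutable current-issue dict) by a clean/drop-prefix/group/format
-- pipeline (objective: alternative decomposition, same cost). Return-value equivalence only; A mutates nothing.

-- ===== PORT A =====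
-- A's two-key dicts are carried through the loop as (title, description) pairs of char lists and
-- materialized into the {"title", "description"} dict (association list) at the return, keys in A's order.
def pvKeywords : List (List Char) :=
  ["recommend".toList, "suggest".toList, "improve".toList, "consider".toList, "should".toList]

def pvIsHeader (l : List Char) : Bool :=
  pvKeywords.any (fun k => PySem.Chars.isIn k (PySem.Chars.lower l))

def pvTitle (l : List Char) : List Char :=
  if l.length > 50 then PySem.Chars.slice l none (some 50) ++ "...".toList else l

def pvSeed (l : List Char) : List Char :=
  "Code review recommendation:\\n\\n".toList ++ l ++ "\\n\\nGenerated from automated code review.".toList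

def pvIssue (p : List Char × List Char) : List (String × String) :=
  [("title", String.ofList p.1), ("description", String.ofList p.2)]

def pvStepA (st : List (List Char × List Char) × Option (List Char × List Char))
    (l : List Char) : List (List Char × List Char) × Option (List Char × List Char) :=
  if pvIsHeader l then
    (st.1 ++ st.2.toList, some (pvTitle l, pvSeed l))
  else
    match st.2 with
    | some cur => (st.1, some (cur.1, cur.2 ++ '\\' :: 'n' :: l))
    | none => st

def parse_review_comments_to_issues_py (review_comments : String) : List (List (String × String)) :=
  let lines := PySem.Chars.splitOn review_comments.toList "\n".toList
  let st := lines.foldl (fun st line =>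
      let l := PySem.Chars.strip line
      if l = [] then st else pvStepA st l) ([], none)
  ((st.1 ++ st.2.toList).take 5).map pvIssue

-- ===== PORT B =====
def pvKeywordsB : List (List Char) :=
  ["recommend".toList, "suggest".toList, "improve".toList, "consider".toList, "should".toList]

def pvIsHeaderB (l : List Char) : Bool :=
  let low := PySem.Chars.lower l
  pvKeywordsB.any (fun k => PySem.Chars.isIn k low)

def pvFormatIssue (g : List (List Char)) : List (String × String) :=
  match g with
  | [] => []  -- unreachable: every group starts with its header line
  | head :: rest =>
    let title := if head.length > 50 then PySem.Chars.slice head none (some 50) ++ "...".toList else head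
    let description := "Code review recommendation:\\n\\n".toList ++ head ++
        "\\n\\nGenerated from automated code review.".toList ++
        rest.flatMap (fun ln => "\\n".toList ++ ln)
    [("title", String.ofList title), ("description", String.ofList description)]

-- groups[-1].append(ln); the [] case is unreachable (python's IndexError): after the dropWhile the first line is a header
def pvAppendLast (gs : List (List (List Char))) (l : List Char) : List (List (List Char)) :=
  match gs with
  | [] => []
  | [g] => [g ++ [l]]
  | g :: rest => g :: pvAppendLast rest l

def parse_review_comments_to_issues_py_alt (review_comments : String) : List (List (String × String)) :=
  let cleaned := ((PySem.Chars.splitOn review_comments.toList "\n".toList).map PySem.Chars.strip).filter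
      (fun s => !s.isEmpty)
  let lines := cleaned.dropWhile (fun l => !pvIsHeaderB l)
  let groups := lines.foldl (fun gs l => if pvIsHeaderB l then gs ++ [[l]] else pvAppendLast gs l) []
  (groups.take 5).map pvFormatIssue

-- ===== PRECONDITION & SPEC =====
def Spec_parse_review_comments_to_issues_py (review_comments : String) (out : List (List (String × String))) : Prop := out = parse_review_comments_to_issues_py_alt review_comments
instance (review_comments : String) (out : List (List (String × String))) : Decidable (Spec_parse_review_comments_to_issues_py review_comments out) := by unfold Spec_parse_review_comments_to_issues_py; infer_instance

-- ===== CLAIM (what is proved, stated in full; the proofs are below) =====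
def Claim_equal_parse_review_comments_to_issues_py : Prop := ∀ (review_comments : String), Dom_parse_review_comments_to_issues_py review_comments → Spec_parse_review_comments_to_issues_py review_comments (parse_review_comments_to_issues_py review_comments)

-- ===== LEMMAS AND PROOFS =====

-- the group decomposition both programs compute: each header line opens a group holding the
-- following non-header lines
def pvGroups : List (List Char) → List (List (List Char))
  | [] => []
  | l :: rest =>
    (l :: rest.takeWhile (fun x => !pvIsHeader x)) :: pvGroups (rest.dropWhile (fun x => !pvIsHeader x))
termination_by ls => ls.length
decreasing_by
  simp only [List.length_cons]
  exact Nat.lt_succ_of_le (List.length_dropWhile_le _ _)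

-- the (title, description) pair A has accumulated for a finished group
def pvFmt : List (List Char) → List Char × List Char
  | [] => ([], [])
  | h :: tl => (pvTitle h, pvSeed h ++ tl.flatMap (fun l => '\\' :: 'n' :: l))

theorem pvGroups_nil : pvGroups [] = [] := by rw [pvGroups]

theorem pvGroups_cons (l : List Char) (rest : List (List Char)) :
    pvGroups (l :: rest)
      = (l :: rest.takeWhile (fun x => !pvIsHeader x))
          :: pvGroups (rest.dropWhile (fun x => !pvIsHeader x)) := by
  rw [pvGroups]

theorem pvAltStep_eq :
    (fun (gs : List (List (List Char))) l => if pvIsHeaderB l then gs ++ [[l]] else pvAppendLast gs l)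
      = (fun (gs : List (List (List Char))) l => if pvIsHeader l then gs ++ [[l]] else pvAppendLast gs l) := rfl

theorem pvAltPred_eq :
    (fun l : List Char => !pvIsHeaderB l) = (fun l : List Char => !pvIsHeader l) := rfl

theorem pvGroups_ne_nil {g : List (List Char)} {ls : List (List Char)}
    (h : g ∈ pvGroups ls) : g ≠ [] := by
  induction ls using pvGroups.induct with
  | case1 => simp [pvGroups_nil] at h
  | case2 l rest ih =>
    rw [pvGroups_cons] at h
    rcases List.mem_cons.mp h with h1 | h2
    · simp [h1]
    · exact ih h2

theorem pvFormatIssue_eq_fmt {g : List (List Char)} (hg : g ≠ []) :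
    pvFormatIssue g = pvIssue (pvFmt g) := by
  cases g with
  | nil => exact absurd rfl hg
  | cons h tl =>
    have hbs : "\\n".toList = ['\\', 'n'] := rfl
    simp [pvFormatIssue, pvFmt, pvIssue, pvTitle, pvSeed, hbs, List.append_assoc]

theorem pvStepA_some (ls : List (List Char)) :
    ∀ (issues : List (List Char × List Char)) (t d : List Char),
    (ls.foldl pvStepA (issues, some (t, d))).1 ++ (ls.foldl pvStepA (issues, some (t, d))).2.toList
      = issues ++ (t, d ++ (ls.takeWhile (fun x => !pvIsHeader x)).flatMap (fun l => '\\' :: 'n' :: l))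
          :: (pvGroups (ls.dropWhile (fun x => !pvIsHeader x))).map pvFmt := by
  induction ls with
  | nil => intro issues t d; simp [pvGroups_nil]
  | cons l rest ih =>
    intro issues t d
    by_cases hl : pvIsHeader l
    · rw [List.foldl_cons, show pvStepA (issues, some (t, d)) l
          = (issues ++ [(t, d)], some (pvTitle l, pvSeed l)) by simp [pvStepA, hl]]
      rw [ih (issues ++ [(t, d)]) (pvTitle l) (pvSeed l)]
      simp only [List.takeWhile_cons, List.dropWhile_cons, hl, Bool.not_true, Bool.false_eq_true,
        if_false, pvGroups_cons]
      simp [pvFmt, List.append_assoc]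
    · rw [List.foldl_cons, show pvStepA (issues, some (t, d)) l
          = (issues, some (t, d ++ '\\' :: 'n' :: l)) by simp [pvStepA, hl]]
      rw [ih issues t (d ++ '\\' :: 'n' :: l)]
      simp only [List.takeWhile_cons, List.dropWhile_cons, hl, Bool.not_false, if_true]
      simp [List.append_assoc]

theorem pvStepA_none (ls : List (List Char)) :
    (ls.foldl pvStepA ([], none)).1 ++ (ls.foldl pvStepA ([], none)).2.toList
      = (pvGroups (ls.dropWhile (fun x => !pvIsHeader x))).map pvFmt := by
  induction ls with
  | nil => simp [pvGroups_nil]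
  | cons l rest ih =>
    by_cases hl : pvIsHeader l
    · rw [List.foldl_cons, show pvStepA ([], none) l
          = (([] : List (List Char × List Char)), some (pvTitle l, pvSeed l)) by simp [pvStepA, hl]]
      rw [pvStepA_some rest [] (pvTitle l) (pvSeed l)]
      simp only [List.dropWhile_cons, hl, Bool.not_true, Bool.false_eq_true, if_false,
        pvGroups_cons]
      simp [pvFmt]
    · rw [List.foldl_cons, show pvStepA ([], none) l
          = (([] : List (List Char × List Char)), none) by simp [pvStepA, hl]]
      simpa [hl] using ih

theorem pvAppendLast_append : ∀ (gs : List (List (List Char))) (g : List (List Char)) (l : List Char),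
    pvAppendLast (gs ++ [g]) l = gs ++ [g ++ [l]]
  | [], g, l => rfl
  | [x], g, l => rfl
  | x :: y :: ys, g, l => by
    show x :: pvAppendLast ((y :: ys) ++ [g]) l = x :: ((y :: ys) ++ [g ++ [l]])
    rw [pvAppendLast_append (y :: ys) g l]

theorem pvStepB_fold (ls : List (List Char)) :
    ∀ (gs : List (List (List Char))) (g : List (List Char)),
    ls.foldl (fun gs l => if pvIsHeader l then gs ++ [[l]] else pvAppendLast gs l) (gs ++ [g])
      = gs ++ (g ++ ls.takeWhile (fun x => !pvIsHeader x))
          :: pvGroups (ls.dropWhile (fun x => !pvIsHeader x)) := by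
  induction ls with
  | nil => intro gs g; simp [pvGroups_nil]
  | cons l rest ih =>
    intro gs g
    by_cases hl : pvIsHeader l
    · rw [List.foldl_cons, show (if pvIsHeader l then gs ++ [g] ++ [[l]] else pvAppendLast (gs ++ [g]) l)
          = (gs ++ [g]) ++ [[l]] by simp [hl]]
      rw [ih (gs ++ [g]) [l]]
      simp only [List.takeWhile_cons, List.dropWhile_cons, hl, Bool.not_true, Bool.false_eq_true,
        if_false, pvGroups_cons]
      simp
    · rw [List.foldl_cons, show (if pvIsHeader l then gs ++ [g] ++ [[l]] else pvAppendLast (gs ++ [g]) l)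
          = gs ++ [g ++ [l]] by simp [hl, pvAppendLast_append]]
      rw [ih gs (g ++ [l])]
      simp only [List.takeWhile_cons, List.dropWhile_cons, hl, Bool.not_false, if_true]
      simp [List.append_assoc]

theorem pvStepB_groups (ls : List (List Char)) :
    (ls.dropWhile (fun x => !pvIsHeader x)).foldl
        (fun gs l => if pvIsHeader l then gs ++ [[l]] else pvAppendLast gs l) []
      = pvGroups (ls.dropWhile (fun x => !pvIsHeader x)) := by
  cases hdw : ls.dropWhile (fun x => !pvIsHeader x) with
  | nil => simp [pvGroups_nil]
  | cons l rest =>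
    have hl : pvIsHeader l = true := by
      have := List.head_dropWhile_not (p := fun x : List Char => !pvIsHeader x) (l := ls)
      rw [hdw] at this
      simpa using this (by simp)
    rw [List.foldl_cons, show (if pvIsHeader l then ([] : List (List (List Char))) ++ [[l]]
        else pvAppendLast [] l) = ([] : List (List (List Char))) ++ [[l]] by simp [hl]]
    rw [pvStepB_fold rest [] [l]]
    rw [pvGroups_cons]
    simp

theorem pvClean_eq : ∀ (lines : List (List Char))
    (st : List (List Char × List Char) × Option (List Char × List Char)),
    lines.foldl (fun st line => let l := PySem.Chars.strip line; if l = [] then st else pvStepA st l) st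
      = ((lines.map PySem.Chars.strip).filter (fun s => !s.isEmpty)).foldl pvStepA st := by
  intro lines
  induction lines with
  | nil => intro st; rfl
  | cons x xs ih =>
    intro st
    by_cases h : PySem.Chars.strip x = []
    · simp only [List.foldl_cons, List.map_cons, List.filter_cons, h, List.isEmpty_nil,
        Bool.not_true, Bool.false_eq_true, if_false]
      simpa [h] using ih st
    · simp only [List.foldl_cons, List.map_cons, List.filter_cons,
        show (PySem.Chars.strip x).isEmpty = false by simpa [List.isEmpty_iff] using h,
        Bool.not_false, if_true, List.foldl_cons]
      simpa [h] using ih (pvStepA st (PySem.Chars.strip x))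

-- ===== VERDICT (by name: the statement is the Claim_ definition above) =====
theorem parse_review_comments_to_issues_py_spec : Claim_equal_parse_review_comments_to_issues_py := by
  intro rc _
  unfold Spec_parse_review_comments_to_issues_py
  unfold parse_review_comments_to_issues_py parse_review_comments_to_issues_py_alt
  simp only []
  rw [pvAltStep_eq, pvAltPred_eq, pvClean_eq, pvStepB_groups]
  set cleaned := ((PySem.Chars.splitOn rc.toList "\n".toList).map PySem.Chars.strip).filter
      (fun s => !s.isEmpty)
  rw [pvStepA_none]
  set G := pvGroups (cleaned.dropWhile fun x => !pvIsHeader x)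
  rw [← List.map_take, List.map_map]
  apply List.map_congr_left
  intro g hg
  exact (pvFormatIssue_eq_fmt (pvGroups_ne_nil (List.mem_of_mem_take hg))).symm
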